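/- GENERATED by mk_final_copies.py from the proof of the farm's unit `compute_sorted_huffman.3` (farm:compute_sorted_huffman.3.1: Proof.lean) as the
   re-elaboration sweep compiled it — do not edit. -/
import Asan.CheckWalk
import Vorbis.Spec.Units.compute_sorted_huffman_3
import Vorbis.Spec.Worked.compute_sorted_huffman_3_Lemmas

open X86 X86.User Asan Vorbis Vorbis.Spec Vorbis.Spec.SortedHuffman

set_option maxRecDepth 4000
set_option maxHeartbeats 4000000

namespace Vorbis.Spec.compute_sorted_huffman_3

/-- `mov ebx, [values + 4·i] ; add rbx, lengths`: the address of byte `vi` of the array at `p`. -/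
theorem zx_add (vi : Nat) (p : Word) (h : vi < 2 ^ 32) (hp : p.toNat + vi < 2 ^ 64) :
    (Word.ofBV (BitVec.setWidth 64 (BitVec.ofNat 32 vi)) + p).toNat = p.toNat + vi := by
  have e : (Word.ofBV (BitVec.setWidth 64 (BitVec.ofNat 32 vi))).toNat = vi := by
    unfold Word.ofBV
    rw [UInt64.toNat_ofBitVec, BitVec.toNat_setWidth, BitVec.toNat_setWidth, BitVec.toNat_ofNat]
    omega
  rw [UInt64.toNat_add, e]
  omega

/-- **Loop 1233, a sparse book, from the head `cut9` (10B3F8H) to the next cut** (C lines 1233 – 1237): `i ≥ len` → the epilogue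
`cut12` (`AtEpilogue`); else `huff_len = lengths[values[i]]` (checks 10B423H L4 `values + 4·i`, `i < se`; 10B435H L1 `lengths + values[i]`, VAL), `include_in_sort` (10B3EAH); not included →
`++i` and the head again (`Next`); included → `code = bit_reverse(c->codewords[i])` (checks 10B443H, 10B460H; call 10B467H),
`n = c->sorted_entries`, `x = 0` → the head of the binary search `cut11` (`Search i 0 se`). -/
theorem headSparse {Lay : Layout} (hLay : Lay.hi = 0x1000000) {μ : Microarch} (hμ : UserX.MicroOK μ) {u₀ : State}
    (hcode : HasCodeNat Lay u₀ Vorbis.L.compute_sorted_huffman.entry Vorbis.Code.code_compute_sorted_huffman.nat Vorbis.L.compute_sorted_huffman.size)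
    (h_load1 : Asan.SmallCheck Lay μ Vorbis.WayInv (Vorbis.CodeOK u₀) [.rax, .rdx] 1 Vorbis.L.__asan_load1_noabort.entry)
    (h_load4 : Asan.SmallCheck Lay μ Vorbis.WayInv (Vorbis.CodeOK u₀) [.rax, .rcx, .rdx] 4 Vorbis.L.__asan_load4_noabort.entry)
    (h_load8 : Asan.SmallCheck Lay μ Vorbis.WayInv (Vorbis.CodeOK u₀) [.rax, .rcx, .rdx] 8 Vorbis.L.__asan_load8_noabort.entry)
    {others : List Obj} {frames : List (Nat × FrameLayout)} {Blk : Block → Prop} {ret : Word} {e v : State} {i : Nat}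
    (h_iis : Calls Lay μ Vorbis.WayInv (Vorbis.conv u₀) Vorbis.L.include_in_sort.entry (Vorbis.Spec.include_in_sort.spec others frames))
    (h_br : Calls Lay μ Vorbis.WayInv (Vorbis.conv u₀) Vorbis.L.bit_reverse.entry (Vorbis.Spec.bit_reverse.spec others frames))
    (hinv : Inv others frames Blk u₀ ret e i v) (hs : Codebook.sparse e.mem (e.reg .rdi).toNat ≠ 0) :
    ReachVia Lay μ WayInv v (fun v' => AtEpilogue others frames Blk u₀ ret e v' ∨ Next others frames Blk u₀ ret e i v' ∨
      Search others frames Blk u₀ ret e i 0 (Codebook.sorted_entries e.mem (e.reg .rdi).toNat).toNat v') := by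
  obtain ⟨hrip, hcom, hlen, hi, hile⟩ := hinv
  have hcom0 := hcom
  obtain ⟨hmid, hpre, hc, hlens, hvals, hfields, hK1, hK2, hK3t, hK4, hzv, hval, hlk⟩ := hcom
  have hmid0 := hmid
  obtain ⟨he, hrsp, hra, h15, h14, h13, h12, hbp, hbx, hsame, hcodeok, habi, hun⟩ := hmid
  v_entry he
  obtain ⟨g1, g2, g3, gbook, glens, gsv, gbsv, glsv⟩ := Geo.of_pre hpre he_room he_top
  have hN : Codebook.N e.mem (e.reg .rdi).toNat = Codebook.sorted_entries e.mem (e.reg .rdi).toNat := Codebook.N_sparse hs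
  rw [hN] at hlen hile
  have k1 := hpre.K1.ent_nonneg
  have hiE : i ≤ (Codebook.sorted_entries e.mem (e.reg .rdi).toNat).toNat := by omega
  have hsx := sext_small i (by omega)
  have hs1 := hpre.K2.sparse_one hs
  obtain ⟨q1, q2, q3, q4, q5, q6, q7⟩ := GeoS.of_pre hpre he_room he_top hs
  have r27 : v.mem.readLE (e.reg .rdi + 27) 1 = 1 := by
    have := hfields.sparse
    rw [hs1] at this
    exact (readLE_field v.mem (e.reg .rdi) 27 1).trans this
  have hax4 := add_mul4 (e.reg .rdx) (Word.ofBV (BitVec.signExtend 64 (BitVec.ofNat 32 i))) i hsx (by omega)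
  have hA4 := eq_addr _ _ hax4
  obtain ⟨vi, hvi⟩ : ∃ vi, v.mem.readLE (e.reg .rdx + Word.ofBV (BitVec.signExtend 64 (BitVec.ofNat 32 i)) * 4) 4 = vi :=
    ⟨_, rfl⟩
  have hvi32 : vi < 2 ^ 32 := by
    rw [← hvi, hA4]
    exact Mem.u32_lt v.mem _
  have hviE : i < (Codebook.sorted_entries e.mem (e.reg .rdi).toNat).toNat →
      vi < (Codebook.entries e.mem (e.reg .rdi).toNat).toNat := by
    intro h
    rw [← hvi, hA4]
    exact hval hs i h
  have w_rip := hrip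
  have w_rsp := hrsp
  have w_rbp := hc
  have w_eq : Mem.EqOn Vorbis.L.textLo Vorbis.L.textHi u₀.mem v.mem := hcodeok
  have hdf : v.flags .df = false := habi.1
  have hmx : v.mxcsr &&& 0x1F80 = 0x1F80 := habi.2
  have hsse := Vorbis.sseOK_of_abiInv habi
  have hEi : (BitVec.ofNat 32 (Codebook.sorted_entries e.mem (e.reg .rdi).toNat).toNat).toInt =
      ((Codebook.sorted_entries e.mem (e.reg .rdi).toNat).toNat : Int) := by
    rw [toInt_of_lt _ (by rw [toNat_ofNat32 _ (by omega)]; omega), toNat_ofNat32 _ (by omega)]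
  have hii : (BitVec.ofNat 32 i).toInt = (i : Int) := by
    rw [toInt_of_lt _ (by rw [toNat_ofNat32 _ (by omega)]; omega), toNat_ofNat32 _ (by omega)]
  have r40 : v.mem.readLE (e.reg .rdi + 40) 8 = Codebook.codewords e.mem (e.reg .rdi).toNat :=
    (readLE_field v.mem (e.reg .rdi) 40 8).trans hfields.codewords
  have hse32 : v.mem.readLE (e.reg .rdi + 2112) 4 = (Codebook.sorted_entries e.mem (e.reg .rdi).toNat).toNat := by
    have h1 := hfields.sorted_entries
    have h0 : 0 ≤ v.mem.i32 ((e.reg .rdi).toNat + 2112) := by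
      show 0 ≤ Codebook.sorted_entries v.mem (e.reg .rdi).toNat
      rw [h1]
      have := hpre.se_pos
      omega
    have h2 := Mem.u32_of_i32_nonneg v.mem ((e.reg .rdi).toNat + 2112) h0
    exact (readLE_field v.mem (e.reg .rdi) 2112 4).trans (h2.trans (congrArg Int.toNat h1))
  clear hK1 hK2 hK3t hK4 hlk hra h15 h14 h13 h12 hbp hbx hsame hmid0 gbsv glsv q1 q3 q4 q5 q6 q7
  u_walk hcode [hμ.vendor] until [Vorbis.L.compute_sorted_huffman.cut9, Vorbis.L.compute_sorted_huffman.cut11, Vorbis.L.compute_sorted_huffman.cut12] span [Vorbis.L.textLo, Vorbis.L.textHi] side (v_side)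
  case check_10b423 =>
    -- 10B423H: L4 `values + 4·i`, `i < se`: inside the `values` block
    have hu1 : ShadowUntouched v.mem s_10b423.mem := by v_untouched
    rw [hEi, hii] at hbr_10b400
    have hsite : Site (Live (stackObjs frames ++ others)) ((e.reg .rdx).toNat + 4 * i) 4 :=
      Site.of_blk hpre.live (hpre.sparse hs).1 (by simp only []; omega) (by simp only []; omega) (by omega)
    exact check_site hpre.shadow.inv (hun.trans hu1) hsite hax4
  case check_10b435 =>
    -- 10B435H: L1 `lengths + values[i]`, `values[i] < entries` (VAL): inside the `lengths` block
    have hu1 : ShadowUntouched v.mem s_10b435.mem := by v_untouched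
    rw [hEi, hii] at hbr_10b400
    have hvE := hviE (by omega)
    have hsite : Site (Live (stackObjs frames ++ others)) ((e.reg .rsi).toNat + vi) 1 :=
      Site.of_blk hpre.live hpre.lens (by simp only []; omega) (by simp only []; omega) (by omega)
    exact check_site hpre.shadow.inv (hun.trans hu1) hsite (zx_add vi _ hvi32 (by omega))
  case call_inv => v_inv
  case pre_10b3ea =>
    -- include_in_sort's precondition: the shadow layer at its entry, `*c` inside one live object
    have hu1 : ShadowUntouched v.mem s_10b3ea.mem := by v_untouched
    have hun' : ShadowUntouched e.mem s_10b3ea.mem := hun.trans hu1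
    refine ⟨hpre.shadow.call hun' (by u_omega) (by u_omega) (by u_omega), ?_⟩
    rw [w_rdi]
    exact hpre.bookLive
  · -- 10B400H taken: `i ≥ len`, the exit to the epilogue (cut12)
    have hst : Mem.SameExcept [] v.mem s_10b400.mem := by
      rw [w_mem]
      exact Mem.SameExcept.refl _ _
    have hc' := common_step hcom0 hst (fun w hw => absurd hw (List.not_mem_nil)) (by rw [w_kept .rsp rfl]; exact hrsp)
      (by rw [w_kept .rbp rfl]; exact hc) w_eq (by v_inv) (by rw [w_mem]; exact hlens) (by rw [w_mem]; exact hvals)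
      (by rw [w_mem]; exact hzv)
    exact ReachVia.done (Or.inl ⟨w_rip, hc'.mid, hc'.zv⟩)
  · -- 10B3EFH: include_in_sort has returned
    v_after_call w_rsp_10b3ea w_mem_10b3ea
    have c1 : s_10b3ear.mem.readLE (e.reg .rsp - 92) 4 = i := by u_frame hi
    have c2 : s_10b3ear.mem.readLE (e.reg .rdi + 40) 8 = Codebook.codewords e.mem (e.reg .rdi).toNat := by u_frame r40
    have c3 : s_10b3ear.mem.readLE (e.reg .rdi + 2112) 4 = (Codebook.sorted_entries e.mem (e.reg .rdi).toNat).toNat := by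
      u_frame hse32
    have c4 : UInt64.ofNat (s_10b3ear.mem.readLE (e.reg .rsp - 88) 8) = e.reg .rsi := by u_frame hlens
    have c5 : UInt64.ofNat (s_10b3ear.mem.readLE (e.reg .rsp - 72) 8) = e.reg .rdx := by u_frame hvals
    have c6 : s_10b3ear.mem.readLE (e.reg .rsp - 80) 4 = (Codebook.sorted_entries e.mem (e.reg .rdi).toNat).toNat := by
      u_frame hlen
    have c7 : s_10b3ear.mem.readLE (e.reg .rsp - 74) 1 = 1 := by
      have h0 : s_10b3ea.mem.readLE (e.reg .rsp - 74) 1 = 1 := by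
        rw [w_mem_10b3ea]
        u_read
      rw [w_mem_10b3ea] at h0
      exact Mem.readLE_frame (ν := s_10b3ear.mem) h0 (by u_eqon) (by u_omega)
    have hsame1 : Mem.SameExcept [⟨(e.reg .rsp).toNat - 336, (e.reg .rsp).toNat - 48⟩] v.mem s_10b3ear.mem := by
      u_same
    have hu1 : ShadowUntouched v.mem s_10b3ear.mem := by v_untouched
    obtain ⟨z, w_rax⟩ : ∃ z, s_10b3ear.reg .rax = z := ⟨_, rfl⟩
    clear w_same w_post
    u_walk hcode [hμ.vendor] until [Vorbis.L.compute_sorted_huffman.cut9, Vorbis.L.compute_sorted_huffman.cut11, Vorbis.L.compute_sorted_huffman.cut12] span [Vorbis.L.textLo, Vorbis.L.textHi] side (v_side)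
    case check_10b443 =>
      -- 10B443H: L8 `c + 28H`, a field of the struct
      have hu2 : ShadowUntouched v.mem s_10b443.mem := by v_untouched
      obtain ⟨B, hB, hBc⟩ := hpre.book
      simp only [Block.contains, Off.sizeof.Codebook] at hBc
      have hsite : Site (Live (stackObjs frames ++ others)) ((e.reg .rdi).toNat + 40) 8 :=
        Site.of_blk hpre.live hB (by omega) (by omega) (by omega)
      exact check_site hpre.shadow.inv (hun.trans hu2) hsite (by u_omega)
    case check_10b460 =>
      -- 10B460H: L4 `codewords + 4·i`, `i < se` (the temp block of `4·se` bytes)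
      have hu2 : ShadowUntouched v.mem s_10b460.mem := by v_untouched
      rw [hEi, hii] at hbr_10b400
      have hB := hpre.K3t.sparse_codewords hs1
      have hw := blk_where hpre.live hpre.shadow.inv hpre.shadow.offText (by omega) hB (by simp only []; omega)
      simp only [] at hw
      have hsite : Site (Live (stackObjs frames ++ others)) (Codebook.codewords e.mem (e.reg .rdi).toNat + 4 * i) 4 :=
        Site.of_blk hpre.live hB (by simp only []; omega) (by simp only []; omega) (by omega)
      exact check_site hpre.shadow.inv (hun.trans hu2) hsite (sext_shl2_add i _ (by omega) (by omega))
    case call_inv => v_inv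
    case pre_10b467 =>
      have hu2 : ShadowUntouched v.mem s_10b467.mem := by v_untouched
      exact hpre.shadow.call (hun.trans hu2) (by u_omega) (by u_omega) (by u_omega)
    · -- 10B46CH: bit_reverse has returned
      have hp : s_10b467r.mem = s_10b467.mem := w_post
      have w_eq := Vorbis.conv_code_eqOn w_code
      have w_df := (show X86.User.abiInv _ from w_inv).1
      have w_mx := (show X86.User.abiInv _ from w_inv).2
      have w_sse := Vorbis.sseOK_of_abiInv w_inv
      have w_mem := hp.trans w_mem_10b467
      obtain ⟨z2, w_rax⟩ : ∃ z2, s_10b467r.reg .rax = z2 := ⟨_, rfl⟩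
      clear w_same w_post
      u_walk hcode [hμ.vendor] until [Vorbis.L.compute_sorted_huffman.cut9, Vorbis.L.compute_sorted_huffman.cut11, Vorbis.L.compute_sorted_huffman.cut12] span [Vorbis.L.textLo, Vorbis.L.textHi] side (v_side)
      -- 10B47DH: the head of the binary search, `x = 0`, `n = se`
      have hst : Mem.SameExcept [⟨(e.reg .rsp).toNat - 336, (e.reg .rsp).toNat - 48⟩] v.mem s_10b477.mem := by u_same
      have hws : ∀ w, w ∈ [Span.mk ((e.reg .rsp).toNat - 336) ((e.reg .rsp).toNat - 48)] → Allowed e w := by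
        intro w hw
        rw [List.mem_singleton.mp hw]
        exact Or.inl ⟨Nat.le_refl _, Nat.le_refl _⟩
      have hzv' : ZV s_10b477.mem (Codebook.sorted_values e.mem (e.reg .rdi).toNat)
          (Codebook.sorted_entries e.mem (e.reg .rdi).toNat).toNat (Codebook.entries e.mem (e.reg .rdi).toNat) := by
        apply hzv.same
        · apply hst.eqOn
          intro w hw
          rw [List.mem_singleton.mp hw]
          simp only []
          omega
        · omega
      have hc' := common_step hcom0 hst hws w_rsp (by rw [w_kept .rbp rfl]; exact hc) w_eq (by v_inv)
        (by u_frame c4) (by u_frame c5) hzv'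
      rw [hEi, hii] at hbr_10b400
      have hoff : s_10b477.mem.readLE (e.reg .rsp - 64) 8 =
          (Word.ofBV (BitVec.signExtend 64 (BitVec.ofNat 32 i)) <<< 2).toNat := by
        rw [w_mem]
        u_read
      rw [sext_shl2 i (by omega)] at hoff
      refine ReachVia.done (Or.inr (Or.inr ⟨w_rip, hc', ?_, ?_, ?_, ?_, hoff, w_r12, w_r15, g1, by omega⟩))
      · rw [hN]
        u_frame c6
      · u_frame c1
      · rw [hN]
        omega
      · rw [hs1]
        u_frame c7
    · -- 10B3F3H … 10B3F8H: entry `i` is not included; `++i`, the loop head again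
      have hst : Mem.SameExcept [⟨(e.reg .rsp).toNat - 336, (e.reg .rsp).toNat - 48⟩] v.mem s_10b3f3.mem := by u_same
      have hws : ∀ w, w ∈ [Span.mk ((e.reg .rsp).toNat - 336) ((e.reg .rsp).toNat - 48)] → Allowed e w := by
        intro w hw
        rw [List.mem_singleton.mp hw]
        exact Or.inl ⟨Nat.le_refl _, Nat.le_refl _⟩
      have hzv' : ZV s_10b3f3.mem (Codebook.sorted_values e.mem (e.reg .rdi).toNat)
          (Codebook.sorted_entries e.mem (e.reg .rdi).toNat).toNat (Codebook.entries e.mem (e.reg .rdi).toNat) := by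
        apply hzv.same
        · apply hst.eqOn
          intro w hw
          rw [List.mem_singleton.mp hw]
          simp only []
          omega
        · omega
      have hc' := common_step hcom0 hst hws w_rsp (by rw [w_kept .rbp rfl]; exact hc) w_eq (by v_inv)
        (by u_frame c4) (by u_frame c5) hzv'
      rw [hEi, hii] at hbr_10b400
      refine ReachVia.done (Or.inr (Or.inl ⟨⟨w_rip, hc', ?_, ?_, ?_⟩, ?_⟩))
      · rw [hN]
        u_frame c6
      · rw [w_mem, Mem.readLE_writeLE_same _ _ _ _ (by decide), inc_small i (by omega)]
        omega
      · rw [hN]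
        omega
      · rw [hN]
        omega

/-- **The end of a round of loop 1233, a dense book** (10B47DH with `n = 1`, 10B4B9H, 10B523H – 10B54CH, 10B3F3H; C lines 1249,
1253): the search is over with `0 ≤ x < se` (BS), `c->sorted_values[x] = i` (checks 10B52AH L8 `c + 838H`, 10B540H S4
`sorted_values + 4·x`; the stored value `i < len = entries` keeps ZV), `++i`, the head `cut9` again. -/
theorem storeSparse {Lay : Layout} (hLay : Lay.hi = 0x1000000) {μ : Microarch} (hμ : UserX.MicroOK μ) {u₀ : State}
    (hcode : HasCodeNat Lay u₀ Vorbis.L.compute_sorted_huffman.entry Vorbis.Code.code_compute_sorted_huffman.nat Vorbis.L.compute_sorted_huffman.size)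
    (h_load8 : Asan.SmallCheck Lay μ Vorbis.WayInv (Vorbis.CodeOK u₀) [.rax, .rcx, .rdx] 8 Vorbis.L.__asan_load8_noabort.entry)
    (h_store4 : Asan.SmallCheck Lay μ Vorbis.WayInv (Vorbis.CodeOK u₀) [.rax, .rcx, .rdx] 4 Vorbis.L.__asan_store4_noabort.entry)
    (h_load4 : Asan.SmallCheck Lay μ Vorbis.WayInv (Vorbis.CodeOK u₀) [.rax, .rcx, .rdx] 4 Vorbis.L.__asan_load4_noabort.entry)
    (h_store1 : Asan.SmallCheck Lay μ Vorbis.WayInv (Vorbis.CodeOK u₀) [.rax, .rdx] 1 Vorbis.L.__asan_store1_noabort.entry)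
    {others : List Obj} {frames : List (Nat × FrameLayout)} {Blk : Block → Prop} {ret : Word} {e v : State} {i x n : Nat}
    (hinv : Search others frames Blk u₀ ret e i x n v) (hn : n ≤ 1) (hs : Codebook.sparse e.mem (e.reg .rdi).toNat ≠ 0) :
    ReachVia Lay μ WayInv v (fun v' => Next others frames Blk u₀ ret e i v') := by
  obtain ⟨hrip, hcom, hlen, hi, hilt, hspb, hoff, b_r12, b_r15, hn1, hbs⟩ := hinv
  have hcom0 := hcom
  obtain ⟨hmid, hpre, hc, hlens, hvals, hfields, hK1, hK2, hK3t, hK4, hzv, hval, hlk⟩ := hcom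
  obtain ⟨he, hrsp, hra, h15, h14, h13, h12, hbp, hbx, hsame, hcodeok, habi, hun⟩ := hmid
  v_entry he
  obtain ⟨g1, g2, g3, gbook, glens, gsv, gbsv, glsv⟩ := Geo.of_pre hpre he_room he_top
  have hN : Codebook.N e.mem (e.reg .rdi).toNat = Codebook.sorted_entries e.mem (e.reg .rdi).toNat := Codebook.N_sparse hs
  have hs1 := hpre.K2.sparse_one hs
  rw [hs1] at hspb
  obtain ⟨q1, q2, q3, q4, q5, q6, q7⟩ := GeoS.of_pre hpre he_room he_top hs
  have k1 := hpre.K1.ent_nonneg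
  have hiS : i < (Codebook.sorted_entries e.mem (e.reg .rdi).toNat).toNat := by
    rw [hN] at hilt
    omega
  have r8 : v.mem.readLE (e.reg .rdi + 8) 8 = Codebook.codeword_lengths e.mem (e.reg .rdi).toNat :=
    (readLE_field v.mem (e.reg .rdi) 8 8).trans hfields.codeword_lengths
  obtain ⟨hl, hhl⟩ : ∃ hl, v.mem.readLE (e.reg .rsp - 73) 1 = hl := ⟨_, rfl⟩
  have hax4 : (UInt64.ofNat (4 * i) + e.reg .rdx).toNat = (e.reg .rdx).toNat + 4 * i := by
    rw [UInt64.toNat_add, UInt64.toNat_ofNat']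
    omega
  have hA4 := eq_addr _ _ hax4
  obtain ⟨vi, hvi⟩ : ∃ vi, v.mem.readLE (UInt64.ofNat (4 * i) + e.reg .rdx) 4 = vi := ⟨_, rfl⟩
  have hvi32 : vi < 2 ^ 32 := by
    rw [← hvi, hA4]
    exact Mem.u32_lt v.mem _
  have hviE : vi < (Codebook.entries e.mem (e.reg .rdi).toNat).toNat := by
    rw [← hvi, hA4]
    exact hval hs i hiS
  have hsvn : (UInt64.ofNat (Codebook.sorted_values e.mem (e.reg .rdi).toNat)).toNat =
      Codebook.sorted_values e.mem (e.reg .rdi).toNat := by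
    rw [UInt64.toNat_ofNat']
    omega
  have hcln : (UInt64.ofNat (Codebook.codeword_lengths e.mem (e.reg .rdi).toNat)).toNat =
      Codebook.codeword_lengths e.mem (e.reg .rdi).toNat := by
    rw [UInt64.toNat_ofNat']
    omega
  have hsx := sext_small x (by omega)
  have hax2 : (Word.ofBV (BitVec.signExtend 64 (BitVec.ofNat 32 x)) * 4 +
      UInt64.ofNat (Codebook.sorted_values e.mem (e.reg .rdi).toNat)).toNat =
      Codebook.sorted_values e.mem (e.reg .rdi).toNat + 4 * x := by
    rw [UInt64.add_comm, add_mul4 _ _ x hsx (by rw [hsvn]; omega), hsvn]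
  have hax3 : (Word.ofBV (BitVec.signExtend 64 (BitVec.ofNat 32 x)) +
      UInt64.ofNat (Codebook.codeword_lengths e.mem (e.reg .rdi).toNat)).toNat =
      Codebook.codeword_lengths e.mem (e.reg .rdi).toNat + x := by
    rw [UInt64.toNat_add, hsx, hcln]
    omega
  have r2104 : v.mem.readLE (e.reg .rdi + 2104) 8 = Codebook.sorted_values e.mem (e.reg .rdi).toNat :=
    (readLE_field v.mem (e.reg .rdi) 2104 8).trans hfields.sorted_values
  have hni : (BitVec.ofNat 32 n).toInt = (n : Int) := by
    rw [toInt_of_lt _ (by rw [toNat_ofNat32 _ (by omega)]; omega), toNat_ofNat32 _ (by omega)]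
  have h1i : (1#32 : BitVec 32).toInt = 1 := by decide
  have e12 : Word.part .w32 (v.reg .r12) = BitVec.ofNat 32 n := by
    rw [b_r12]
    exact part32_ofBV _
  have e15 : Word.part .w32 (v.reg .r15) = BitVec.ofNat 32 x := by
    rw [b_r15]
    exact part32_ofBV _
  have hax := sext_shl2_add x (Codebook.sorted_values e.mem (e.reg .rdi).toNat) (by omega) (by omega)
  have hinc := inc_small i (by omega)
  have w_rip := hrip
  have w_rsp := hrsp
  have w_rbp := hc
  have w_eq : Mem.EqOn Vorbis.L.textLo Vorbis.L.textHi u₀.mem v.mem := hcodeok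
  have hdf : v.flags .df = false := habi.1
  have hmx : v.mxcsr &&& 0x1F80 = 0x1F80 := habi.2
  have hsse := Vorbis.sseOK_of_abiInv habi
  clear hK1 hK2 hK3t hK4 hlk hra h15 h14 h13 h12 hbp hbx hsame glsv glens q3 q4 q5 q7
  u_walk hcode [hμ.vendor] until [Vorbis.L.compute_sorted_huffman.cut9, Vorbis.L.compute_sorted_huffman.cut11] span [Vorbis.L.textLo, Vorbis.L.textHi] side (v_side)
  case check_10b4d0 =>
    -- 10B4D0H: L4 `values + 4·i`, `i < se`
    have hu1 : ShadowUntouched v.mem s_10b4d0.mem := by v_untouched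
    have hsite : Site (Live (stackObjs frames ++ others)) ((e.reg .rdx).toNat + 4 * i) 4 :=
      Site.of_blk hpre.live (hpre.sparse hs).1 (by simp only []; omega) (by simp only []; omega) (by omega)
    exact check_site hpre.shadow.inv (hun.trans hu1) hsite hax4
  case check_10b4df =>
    -- 10B4DFH: L8 `c + 838H`, a field of the struct
    have hu1 : ShadowUntouched v.mem s_10b4df.mem := by v_untouched
    obtain ⟨B, hB, hBc⟩ := hpre.book
    simp only [Block.contains, Off.sizeof.Codebook] at hBc
    have hsite : Site (Live (stackObjs frames ++ others)) ((e.reg .rdi).toNat + 2104) 8 :=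
      Site.of_blk hpre.live hB (by omega) (by omega) (by omega)
    exact check_site hpre.shadow.inv (hun.trans hu1) hsite (by u_omega)
  case check_10b4f9 =>
    -- 10B4F9H: S4 `sorted_values + 4·x`, `x < se` by BS
    have hu1 : ShadowUntouched v.mem s_10b4f9.mem := by v_untouched
    have hsite : Site (Live (stackObjs frames ++ others))
        (Codebook.sorted_values e.mem (e.reg .rdi).toNat + 4 * x) 4 :=
      Site.of_blk hpre.live (hpre.K4.sv hpre.se_pos) (by simp only []; omega) (by simp only []; omega) (by omega)
    exact check_site hpre.shadow.inv (hun.trans hu1) hsite hax2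
  case check_10b505 =>
    -- 10B505H: L8 `c + 8`, a field of the struct
    have hu1 : ShadowUntouched v.mem s_10b505.mem := by v_untouched
    obtain ⟨B, hB, hBc⟩ := hpre.book
    simp only [Block.contains, Off.sizeof.Codebook] at hBc
    have hsite : Site (Live (stackObjs frames ++ others)) ((e.reg .rdi).toNat + 8) 8 :=
      Site.of_blk hpre.live hB (by omega) (by omega) (by omega)
    exact check_site hpre.shadow.inv (hun.trans hu1) hsite (by u_omega)
  case check_10b511 =>
    -- 10B511H: S1 `codeword_lengths + x`, `x < se` by BS: the block of `se` bytes
    have hu1 : ShadowUntouched v.mem s_10b511.mem := by v_untouched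
    have hsite : Site (Live (stackObjs frames ++ others))
        (Codebook.codeword_lengths e.mem (e.reg .rdi).toNat + x) 1 :=
      Site.of_blk hpre.live (hpre.K3t.sparse_lengths hs1) (by simp only []; omega) (by simp only []; omega) (by omega)
    exact check_site hpre.shadow.inv (hun.trans hu1) hsite hax3
  -- 10B3F8H: the loop head again, `i + 1`
  have hst : Mem.SameExcept [⟨(e.reg .rsp).toNat - 336, (e.reg .rsp).toNat - 48⟩,
      ⟨Codebook.sorted_values e.mem (e.reg .rdi).toNat + 4 * x,
        Codebook.sorted_values e.mem (e.reg .rdi).toNat + 4 * x + 4⟩,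
      ⟨Codebook.codeword_lengths e.mem (e.reg .rdi).toNat + x,
        Codebook.codeword_lengths e.mem (e.reg .rdi).toNat + x + 1⟩] v.mem s_10b3f3.mem := by u_same
  have hws : ∀ w, w ∈ [Span.mk ((e.reg .rsp).toNat - 336) ((e.reg .rsp).toNat - 48),
      Span.mk (Codebook.sorted_values e.mem (e.reg .rdi).toNat + 4 * x)
        (Codebook.sorted_values e.mem (e.reg .rdi).toNat + 4 * x + 4),
      Span.mk (Codebook.codeword_lengths e.mem (e.reg .rdi).toNat + x)
        (Codebook.codeword_lengths e.mem (e.reg .rdi).toNat + x + 1)] → Allowed e w := by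
    intro w hw
    rcases List.mem_cons.mp hw with h | h
    · rw [h]
      exact Or.inl ⟨Nat.le_refl _, Nat.le_refl _⟩
    · rcases List.mem_cons.mp h with h | h
      · rw [h]
        refine Or.inr (Or.inl ⟨?_, ?_⟩)
        · simp only []
          omega
        · simp only []
          omega
      · rw [List.mem_singleton.mp h]
        refine Or.inr (Or.inr ⟨hs, ?_, ?_⟩)
        · simp only []
          omega
        · simp only []
          omega
  have hrd : s_10b3f3.mem.readLE (Word.ofBV (BitVec.signExtend 64 (BitVec.ofNat 32 x)) * 4 +
      UInt64.ofNat (Codebook.sorted_values e.mem (e.reg .rdi).toNat)) 4 = (BitVec.ofNat 32 vi).toNat := by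
    rw [w_mem]
    u_read
  have hA := eq_addr _ _ hax2
  have hv : s_10b3f3.mem.i32 (Codebook.sorted_values e.mem (e.reg .rdi).toNat + 4 * x) = (vi : Int) := by
    rw [Mem.i32_def]
    show sint32 (s_10b3f3.mem.readLE (addr (Codebook.sorted_values e.mem (e.reg .rdi).toNat + 4 * x)) 4) = _
    rw [← hA, hrd, toNat_ofNat32 vi (by omega)]
    unfold sint32
    rw [if_pos (by omega)]
  have hoffw : ∀ w, w ∈ [Span.mk ((e.reg .rsp).toNat - 336) ((e.reg .rsp).toNat - 48),
      Span.mk (Codebook.sorted_values e.mem (e.reg .rdi).toNat + 4 * x)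
        (Codebook.sorted_values e.mem (e.reg .rdi).toNat + 4 * x + 4),
      Span.mk (Codebook.codeword_lengths e.mem (e.reg .rdi).toNat + x)
        (Codebook.codeword_lengths e.mem (e.reg .rdi).toNat + x + 1)] →
      ∀ lo hi, Codebook.sorted_values e.mem (e.reg .rdi).toNat ≤ lo →
        hi ≤ Codebook.sorted_values e.mem (e.reg .rdi).toNat +
          4 * (Codebook.sorted_entries e.mem (e.reg .rdi).toNat).toNat →
        (hi ≤ Codebook.sorted_values e.mem (e.reg .rdi).toNat + 4 * x ∨
          Codebook.sorted_values e.mem (e.reg .rdi).toNat + 4 * x + 4 ≤ lo) → hi ≤ w.lo ∨ w.hi ≤ lo := by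
    intro w hw lo hi h1 h2 h3
    rcases List.mem_cons.mp hw with h | h
    · rw [h]
      simp only []
      omega
    · rcases List.mem_cons.mp h with h | h
      · rw [h]
        simp only []
        omega
      · rw [List.mem_singleton.mp h]
        simp only []
        omega
  have hzv' : ZV s_10b3f3.mem (Codebook.sorted_values e.mem (e.reg .rdi).toNat)
      (Codebook.sorted_entries e.mem (e.reg .rdi).toNat).toNat (Codebook.entries e.mem (e.reg .rdi).toNat) := by
    apply hzv.store (x := x) (by omega)
    · apply hst.eqOn
      intro w hw
      exact hoffw w hw _ _ (Nat.le_refl _) (by omega) (Or.inl (Nat.le_refl _))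
    · apply hst.eqOn
      intro w hw
      exact hoffw w hw _ _ (by omega) (Nat.le_refl _) (Or.inr (Nat.le_refl _))
    · omega
    · rw [hv]
      omega
  have hc' := common_step hcom0 hst hws w_rsp (by rw [w_kept .rbp rfl]; exact hc) w_eq (by v_inv)
    (by u_frame hlens) (by u_frame hvals) hzv'
  refine ReachVia.done ⟨⟨w_rip, hc', ?_, ?_, ?_⟩, hilt⟩
  · u_frame hlen
  · rw [w_mem, Mem.readLE_writeLE_same _ _ _ _ (by decide), hinc]
    omega
  · omega

/-- **The whole binary search and the store arm of one round**: from BS at `cut11` to the head of loop 1233 for `i + 1`, by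
induction on `n` (`searchStep` while `n ≥ 2`, the store arm for `n = 1`). -/
theorem searchAll {Lay : Layout} {μ : Microarch} {others : List Obj} {frames : List (Nat × FrameLayout)}
    {Blk : Block → Prop} {u₀ : State} {ret : Word} {e : State} {i : Nat}
    (hstep : ∀ x n v, Search others frames Blk u₀ ret e i x n v → 2 ≤ n →
      ReachVia Lay μ WayInv v (fun v' => ∃ x' n', Search others frames Blk u₀ ret e i x' n' v' ∧ n' < n))
    (hstore : ∀ x n v, Search others frames Blk u₀ ret e i x n v → n ≤ 1 →
      ReachVia Lay μ WayInv v (fun v' => Next others frames Blk u₀ ret e i v')) :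
    ∀ n x v, Search others frames Blk u₀ ret e i x n v →
      ReachVia Lay μ WayInv v (fun v' => Next others frames Blk u₀ ret e i v') := by
  intro n
  induction n using Nat.strongRecOn with
  | _ n ih =>
    intro x v hsr
    by_cases hn : n ≤ 1
    · exact hstore x n v hsr hn
    · refine (hstep x n v hsr (by omega)).trans ?_
      intro v' hv'
      obtain ⟨x', n', hsr', hlt⟩ := hv'
      exact ih n' hlt x' v' hsr'

end Vorbis.Spec.compute_sorted_huffman_3

/-- Segment 3 of `compute_sorted_huffman` (`cut9` 10B3F8H → `cut12` 10B551H): loop 1233 by `ReachVia.loop` on the measure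
`len − i` (`i` = the dword `[rsp+0CH]`); one round = the head (`headDense` / `headSparse`), the binary search (`searchAll`:
`searchStep` on the measure `n`) and the store arm (`storeDense` / `storeSparse`). -/
theorem Vorbis.Spec.Worked.compute_sorted_huffman_3_ok : Vorbis.Spec.compute_sorted_huffman_3.Statement := by
  unfold Vorbis.Spec.compute_sorted_huffman_3.Statement
  intro Lay hLay μ hμ u₀ hcode h_load1 h_iis h_load4 h_load8 h_br h_store4 h_store1
  intro others frames Blk ret e u hat
  have hiis := h_iis others frames
  have hbr := h_br others frames
  have hpre := hat.common.pre
  -- one round of loop 1233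
  have round : ∀ i v, Vorbis.Spec.compute_sorted_huffman_3.Inv others frames Blk u₀ ret e i v →
      ReachVia Lay μ WayInv v (fun v' => AtEpilogue others frames Blk u₀ ret e v' ∨
        Vorbis.Spec.compute_sorted_huffman_3.Next others frames Blk u₀ ret e i v') := by
    intro i v hinv
    by_cases hs : Codebook.sparse e.mem (e.reg .rdi).toNat = 0
    · refine (Vorbis.Spec.compute_sorted_huffman_3.headDense hLay hμ hcode h_load1 h_load4 h_load8 hiis hbr hinv hs).trans ?_
      intro v' hv'
      rcases hv' with h | h | h
      · exact ReachVia.done (Or.inl h)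
      · exact ReachVia.done (Or.inr h)
      · refine (Vorbis.Spec.compute_sorted_huffman_3.searchAll
          (fun x n w hw h2 => Vorbis.Spec.compute_sorted_huffman_3.searchStep hLay hμ hcode h_load4 hw h2)
          (fun x n w hw h1 => Vorbis.Spec.compute_sorted_huffman_3.storeDense hLay hμ hcode h_load8 h_store4 hw h1 hs)
          _ _ v' h).mono ?_
        intro w hw
        exact Or.inr hw
    · refine (Vorbis.Spec.compute_sorted_huffman_3.headSparse hLay hμ hcode h_load1 h_load4 h_load8 hiis hbr hinv hs).trans ?_
      intro v' hv'
      rcases hv' with h | h | h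
      · exact ReachVia.done (Or.inl h)
      · exact ReachVia.done (Or.inr h)
      · refine (Vorbis.Spec.compute_sorted_huffman_3.searchAll
          (fun x n w hw h2 => Vorbis.Spec.compute_sorted_huffman_3.searchStep hLay hμ hcode h_load4 hw h2)
          (fun x n w hw h1 =>
            Vorbis.Spec.compute_sorted_huffman_3.storeSparse hLay hμ hcode h_load8 h_store4 h_load4 h_store1 hw h1 hs)
          _ _ v' h).mono ?_
        intro w hw
        exact Or.inr hw
  -- the loop: measure `len − i`
  refine ReachVia.loop
    (Inv := fun v => ∃ i, Vorbis.Spec.compute_sorted_huffman_3.Inv others frames Blk u₀ ret e i v)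
    (fun v => (Codebook.N e.mem (e.reg .rdi).toNat).toNat - v.mem.readLE (e.reg .rsp - 92) 4) ?_ u ?_
  · intro v hv
    obtain ⟨i, hinv⟩ := hv
    refine (round i v hinv).mono ?_
    intro v' hv'
    rcases hv' with h | h
    · exact Or.inl h
    · refine Or.inr ⟨⟨i + 1, h.1⟩, ?_⟩
      have h1 := h.1.cnt
      have h2 := hinv.cnt
      have h3 := h.2
      simp only [h1, h2]
      omega
  · -- the first arrival: `i = 0`
    refine ⟨0, hat.rip, hat.common, hat.len, hat.i, ?_⟩
    exact Codebook.N_nonneg hpre.K1 hpre.K2
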